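-- pv_equiv track=rewrite | github.com/camerondugan/Python-Image-Upscaler | upscaler.py | surround
-- ===== SOURCE A (Python) =====
-- def surround(x,y,r,maxX,maxY):
--     sur = []
--     for w in range(-r+1,r):
--         for h in range(-r+1,r):
--             cw,ch = x+w,y+h
--             if (cw >= 0 and ch >= 0 and cw < maxX and ch < maxY):
--                 sur.append((cw,ch))
--     return sur
-- ===== SOURCE B (Python) =====
-- def surround(x, y, r, maxX, maxY):
--     cw_lo = max(x - r + 1, 0)
--     ch_lo = max(y - r + 1, 0)
--     w = min(x + r - 1, maxX - 1) - cw_lo + 1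
--     h = min(y + r - 1, maxY - 1) - ch_lo + 1
--     if w <= 0 or h <= 0:
--         return []
--     return [(cw_lo + i // h, ch_lo + i % h) for i in range(w * h)]
-- ===== Notes on version B (the rewrite author's own statement) =====
-- stated objective: alternative
-- what changed: B replaces A's nested offset loops with an in-loop bounds test by a closed-form construction: it clamps the square to the frame, and then a SINGLE flat loop over range(w*h) produces each point by divmod index arithmetic (i//h, i%h), with no nested loop and no per-point test.
import Mathlib
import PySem

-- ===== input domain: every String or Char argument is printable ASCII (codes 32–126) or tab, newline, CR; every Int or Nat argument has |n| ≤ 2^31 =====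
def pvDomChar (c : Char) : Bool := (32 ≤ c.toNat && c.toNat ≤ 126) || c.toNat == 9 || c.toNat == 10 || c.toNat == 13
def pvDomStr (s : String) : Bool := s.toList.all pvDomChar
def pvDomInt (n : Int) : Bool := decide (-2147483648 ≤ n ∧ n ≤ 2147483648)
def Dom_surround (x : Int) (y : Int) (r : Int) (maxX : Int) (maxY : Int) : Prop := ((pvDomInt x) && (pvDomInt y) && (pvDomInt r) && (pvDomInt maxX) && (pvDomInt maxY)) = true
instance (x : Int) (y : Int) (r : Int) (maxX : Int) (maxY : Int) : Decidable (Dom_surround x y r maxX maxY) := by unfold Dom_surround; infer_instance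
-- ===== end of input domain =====

-- B clamps the square to the frame and emits all points with ONE flat loop using divmod index
-- arithmetic (i//h, i%h) — no nested loops, no per-point bounds test (alternative decomposition).

-- ===== PORT A =====
def surround (x : Int) (y : Int) (r : Int) (maxX : Int) (maxY : Int) : List (Int × Int) :=
  (PySem.List.pyRange (-r+1) r 1).foldl (fun sur w =>
    (PySem.List.pyRange (-r+1) r 1).foldl (fun sur h =>
      let cw := x + w
      let ch := y + h
      if cw ≥ 0 ∧ ch ≥ 0 ∧ cw < maxX ∧ ch < maxY then sur ++ [(cw, ch)] else sur) sur) []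

-- ===== PORT B =====
def surround_alt (x : Int) (y : Int) (r : Int) (maxX : Int) (maxY : Int) : List (Int × Int) :=
  let cwLo := max (x - r + 1) 0
  let chLo := max (y - r + 1) 0
  let w := min (x + r - 1) (maxX - 1) - cwLo + 1
  let h := min (y + r - 1) (maxY - 1) - chLo + 1
  if w ≤ 0 ∨ h ≤ 0 then []
  else (PySem.List.pyRange 0 (w * h) 1).map
    (fun i => (cwLo + PySem.Int.floordiv i h, chLo + PySem.Int.mod i h))

-- ===== PRECONDITION & SPEC =====
def Spec_surround (x : Int) (y : Int) (r : Int) (maxX : Int) (maxY : Int) (out : List (Int × Int)) : Prop := out = surround_alt x y r maxX maxY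
instance (x : Int) (y : Int) (r : Int) (maxX : Int) (maxY : Int) (out : List (Int × Int)) : Decidable (Spec_surround x y r maxX maxY out) := by unfold Spec_surround; infer_instance

-- ===== CLAIM (what is proved, stated in full; the proofs are below) =====
def Claim_equal_surround : Prop := ∀ (x : Int) (y : Int) (r : Int) (maxX : Int) (maxY : Int), Dom_surround x y r maxX maxY → Spec_surround x y r maxX maxY (surround x y r maxX maxY)

-- ===== LEMMAS AND PROOFS =====

-- the common intermediate form: the clamped rectangle traversed as a nested product
def pvNested (cwLo cwHi chLo chHi : Int) : List (Int × Int) :=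
  (PySem.List.pyRange cwLo (cwHi + 1) 1).flatMap (fun cw =>
    (PySem.List.pyRange chLo (chHi + 1) 1).map (fun ch => (cw, ch)))

-- inner loop "if p(h): out.append(f(h))" is append of a filtered map
theorem pv_foldl_if {α β : Type} (H : List α) (P : α → Prop) [DecidablePred P] (f : α → β) (acc : List β) :
    H.foldl (fun a h => if P h then a ++ [f h] else a) acc
      = acc ++ (H.filter (fun h => decide (P h))).map f := by
  induction H generalizing acc with
  | nil => simp
  | cons h t ih =>
    simp only [List.foldl_cons, List.filter_cons]
    by_cases hp : P h <;> simp [hp, ih]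

-- outer loop "out += g(w)" is flatMap
theorem pv_foldl_app {α β : Type} (l : List α) (g : α → List β) (acc : List β) :
    l.foldl (fun a x => a ++ g x) acc = acc ++ l.flatMap g := by
  induction l generalizing acc with
  | nil => simp
  | cons w t ih => simp [ih]

-- flatMap of an if-empty body is flatMap of the filtered list
theorem pv_flatMap_if {α β : Type} (l : List α) (q : α → Bool) (u : α → List β) :
    (l.flatMap fun w => if q w = true then u w else [])
      = (l.filter q).flatMap u := by
  induction l with
  | nil => rfl
  | cons w t ih => by_cases hq : q w = true <;> simp [hq, ih]

-- filtering an int range by a half-open window clamps the range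
theorem pv_filter_range (a b lo hi : Int) :
    (PySem.List.pyRange a b 1).filter (fun v => decide (lo ≤ v ∧ v < hi))
      = PySem.List.pyRange (max a lo) (min b hi) 1 := by
  by_cases hab : b ≤ a
  · rw [PySem.List.pyRange_one_eq_nil hab, PySem.List.pyRange_one_eq_nil (by omega)]
    rfl
  · push_neg at hab
    have hlen : ((b - (a+1)).toNat) < ((b - a).toNat) := by omega
    rw [PySem.List.pyRange_one_cons hab, List.filter_cons, pv_filter_range (a+1) b lo hi]
    by_cases ha : lo ≤ a ∧ a < hi
    · rw [if_pos (by simp [ha]), show max (a+1) lo = a+1 by omega, show max a lo = a by omega,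
          PySem.List.pyRange_one_cons (show a < min b hi by omega)]
    · have : (decide (lo ≤ a ∧ a < hi)) = false := by simp [ha]
      rw [this]
      simp only [Bool.false_eq_true, if_neg, not_false_iff]
      by_cases hlo : a < lo
      · congr 1 <;> omega
      · push_neg at hlo
        have hhi : hi ≤ a := by omega
        rw [PySem.List.pyRange_one_eq_nil (by omega), PySem.List.pyRange_one_eq_nil (by omega)]
termination_by (b - a).toNat
decreasing_by omega

-- shifting an int range
theorem pv_range_shift (c a b : Int) :
    PySem.List.pyRange (c + a) (c + b) 1 = (PySem.List.pyRange a b 1).map (fun v => c + v) := by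
  rw [PySem.List.pyRange_one, PySem.List.pyRange_one, List.map_map]
  have : (c + b) - (c + a) = b - a := by ring
  rw [this]
  apply List.map_congr_left
  intro k _
  simp
  ring

-- A's guarded nested loops equal the nested traversal of the clamped rectangle
theorem surround_eq_nested (x y r maxX maxY : Int) :
    surround x y r maxX maxY
      = pvNested (max (x - r + 1) 0) (min (x + r - 1) (maxX - 1))
                 (max (y - r + 1) 0) (min (y + r - 1) (maxY - 1)) := by
  unfold surround pvNested
  simp only [pv_foldl_if]
  simp only [pv_foldl_app, List.nil_append]
  have hfun : (fun w => ((PySem.List.pyRange (-r+1) r 1).filter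
        (fun h => decide (x + w ≥ 0 ∧ y + h ≥ 0 ∧ x + w < maxX ∧ y + h < maxY))).map
        (fun h => (x + w, y + h)))
      = (fun w => if decide (0 ≤ x + w ∧ x + w < maxX) = true
          then ((PySem.List.pyRange (-r+1) r 1).filter
                 (fun h => decide (-y ≤ h ∧ h < maxY - y))).map (fun h => (x + w, y + h))
          else []) := by
    funext w
    by_cases hw : 0 ≤ x + w ∧ x + w < maxX
    · rw [if_pos (by simpa using hw)]
      congr 1
      apply List.filter_congr
      intro h _
      apply decide_eq_decide.mpr
      constructor <;> intro hh <;> omega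
    · rw [if_neg (by simpa using hw)]
      have : ∀ h, (decide (x + w ≥ 0 ∧ y + h ≥ 0 ∧ x + w < maxX ∧ y + h < maxY)) = false := by
        intro h; simp only [decide_eq_false_iff_not]; intro hh; exact hw ⟨by omega, by omega⟩
      rw [List.filter_congr (fun h _ => this h)]
      simp
  rw [hfun, pv_flatMap_if, pv_filter_range]
  have houtf : (PySem.List.pyRange (-r+1) r 1).filter (fun w => decide (0 ≤ x + w ∧ x + w < maxX))
      = PySem.List.pyRange (max (-r+1) (-x)) (min r (maxX - x)) 1 := by
    rw [List.filter_congr (l := PySem.List.pyRange (-r+1) r 1)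
          (q := fun w => decide (-x ≤ w ∧ w < maxX - x))
          (fun w _ => decide_eq_decide.mpr (by constructor <;> intro hh <;> omega)),
        pv_filter_range]
  rw [houtf]
  have houter : PySem.List.pyRange (max (x - r + 1) 0) (min (x + r - 1) (maxX - 1) + 1) 1
      = (PySem.List.pyRange (max (-r+1) (-x)) (min r (maxX - x)) 1).map (fun v => x + v) := by
    rw [← pv_range_shift]
    congr 1 <;> omega
  have hinner : PySem.List.pyRange (max (y - r + 1) 0) (min (y + r - 1) (maxY - 1) + 1) 1
      = (PySem.List.pyRange (max (-r+1) (-y)) (min r (maxY - y)) 1).map (fun v => y + v) := by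
    rw [← pv_range_shift]
    congr 1 <;> omega
  rw [houter, hinner, List.flatMap_map]
  congr 1
  funext w
  rw [List.map_map]
  rfl

-- a single divmod-indexed pass over range(m*n) equals the nested product traversal
theorem pv_divmod_grid (a c : Int) (m n : Nat) (hn : 0 < n) :
    (List.range (m * n)).map (fun k : Nat => ((a + (k / n : Nat), c + (k % n : Nat)) : Int × Int))
      = (List.range m).flatMap (fun q : Nat => (List.range n).map (fun s : Nat => ((a + (q : Nat), c + (s : Nat)) : Int × Int))) := by
  induction m with
  | zero => simp
  | succ m ih =>
    rw [Nat.succ_mul, List.range_add, List.map_append, List.map_map, List.range_succ,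
        List.flatMap_append, ← ih]
    congr 1
    simp only [List.flatMap_cons, List.flatMap_nil, List.append_nil]
    apply List.map_congr_left
    intro s hs
    have hslt : s < n := List.mem_range.mp hs
    simp only [Function.comp_apply]
    have hdiv : (m * n + s) / n = m := by
      rw [Nat.add_comm, Nat.mul_comm, Nat.add_mul_div_left _ _ hn, Nat.div_eq_of_lt hslt, Nat.zero_add]
    have hmod : (m * n + s) % n = s := by
      rw [Nat.add_comm, Nat.mul_comm, Nat.add_mul_mod_self_left, Nat.mod_eq_of_lt hslt]
    rw [hdiv, hmod]

-- B's flat divmod pass equals the nested traversal of the clamped rectangle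
theorem surround_alt_eq_nested (x y r maxX maxY : Int) :
    surround_alt x y r maxX maxY
      = pvNested (max (x - r + 1) 0) (min (x + r - 1) (maxX - 1))
                 (max (y - r + 1) 0) (min (y + r - 1) (maxY - 1)) := by
  unfold surround_alt pvNested
  set cwLo := max (x - r + 1) 0 with hcw
  set chLo := max (y - r + 1) 0 with hch
  set cwHi := min (x + r - 1) (maxX - 1) with hcwh
  set chHi := min (y + r - 1) (maxY - 1) with hchh
  by_cases hwh : cwHi - cwLo + 1 ≤ 0 ∨ chHi - chLo + 1 ≤ 0
  · rw [if_pos hwh]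
    rcases hwh with hle | hle
    · rw [PySem.List.pyRange_one_eq_nil (show cwHi + 1 ≤ cwLo by omega)]
      rfl
    · rw [show (fun cw => (PySem.List.pyRange chLo (chHi + 1) 1).map (fun ch => ((cw, ch) : Int × Int)))
            = (fun _ : Int => ([] : List (Int × Int))) from
          funext fun cw => by rw [PySem.List.pyRange_one_eq_nil (show chHi + 1 ≤ chLo by omega)]; rfl]
      simp
  · rw [if_neg hwh]
    push_neg at hwh
    obtain ⟨hwpos, hhpos⟩ := hwh
    set w := cwHi - cwLo + 1 with hw
    set h := chHi - chLo + 1 with hh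
    have hhn : h = ((h.toNat : Int)) := by omega
    rw [show cwHi + 1 = cwLo + w from by omega, show chHi + 1 = chLo + h from by omega,
        PySem.List.pyRange_one cwLo (cwLo + w), PySem.List.pyRange_one chLo (chLo + h),
        PySem.List.pyRange_one 0 (w * h)]
    have hmul : (w * h - 0).toNat = w.toNat * h.toNat := by
      have hcast : w * h = ((w.toNat * h.toNat : Nat) : Int) := by
        rw [show w = ((w.toNat : Int)) from by omega, hhn]
        simp
      rw [hcast]
      omega
    rw [show (cwLo + w - cwLo).toNat = w.toNat from by omega,
        show (chLo + h - chLo).toNat = h.toNat from by omega, hmul,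
        List.flatMap_map, List.map_map]
    have hbody : ((fun i : Int => ((cwLo + PySem.Int.floordiv i h, chLo + PySem.Int.mod i h) : Int × Int)) ∘
          (fun k : Nat => (0 : Int) + (k : Int)))
        = (fun k : Nat => ((cwLo + (k / h.toNat : Nat), chLo + (k % h.toNat : Nat)) : Int × Int)) := by
      funext k
      simp only [Function.comp_apply, zero_add]
      rw [hhn, PySem.Int.floordiv_natCast, PySem.Int.mod_natCast]
      simp
    rw [hbody, pv_divmod_grid cwLo chLo w.toNat h.toNat (by omega)]
    congr 1
    funext q
    rw [List.map_map]
    exact List.map_congr_left fun s _ => rfl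

theorem surround_eq (x y r maxX maxY : Int) :
    surround x y r maxX maxY = surround_alt x y r maxX maxY := by
  rw [surround_eq_nested, surround_alt_eq_nested]

-- ===== VERDICT (by name: the statement is the Claim_ definition above) =====
theorem surround_spec : Claim_equal_surround := by
  intro x y r maxX maxY _
  exact surround_eq x y r maxX maxY
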